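-- pv_equiv track=rewrite | github.com/afzalsiddique/problem-solving | Problem_Solving_Python/Miscellaneous/magical_cows.py | count_farms
-- ===== SOURCE A (Python) =====
-- from typing import List
--
-- def count_farms(max_cows, no_farms, no_queries, cows: List[int]):
--     MAX_DAYS = 50
--     dp = [[0] * (max_cows+1) for _ in range(MAX_DAYS+1)]
--     for cow in cows:
--         dp[0][cow] += 1
--     for row in range(MAX_DAYS):
--         for col in range(1, max_cows+1):
--             if col * 2 <= max_cows:
--                 dp[row+1][col * 2] = dp[row][col]
--             else:
--                 dp[row+1][col] += 2 * dp[row][col]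
--     return dp
-- ===== SOURCE B (Python) =====
-- def _saturation(c, max_cows):
--     # closed form of one farm's life: it doubles k times until 2*size would
--     # exceed max_cows, then stays at `size` while its census doubles daily
--     k, size = 0, c
--     while size * 2 <= max_cows:
--         size *= 2
--         k += 1
--     return k, size
--
--
-- def count_farms(max_cows, no_farms, no_queries, cows):
--     # Closed-form trajectories instead of a day-by-day DP recurrence: every
--     # output row is filled directly from the day-0 counts, since a farm that
--     # starts with c cows sits at c<<d with multiplicity 1 while d <= k(c),
--     # and afterwards at its saturation size with multiplicity 2**(d-k(c)).
--     counts = [0] * (max_cows + 1)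
--     for cow in cows:
--         counts[cow] += 1
--     table = [counts]
--     for d in range(1, 51):
--         row = [0] * (max_cows + 1)
--         for c in range(1, max_cows + 1):
--             n = counts[c]
--             if n != 0:
--                 k, size = _saturation(c, max_cows)
--                 if d <= k:
--                     row[c << d] += n
--                 else:
--                     row[size] += n << (d - k)
--         table.append(row)
--     return table
-- ===== Notes on version B (the rewrite author's own statement) =====
-- stated objective: alternative
-- what changed: B drops A's day-to-day DP recurrence entirely: each of the 50 output rows is filled directly from the day-0 counts via the closed-form trajectory of one farm (a farm of c cows sits at c*2^d with multiplicity 1 until its saturation day k(c), then at its saturation size with multiplicity 2^(d-k)), instead of deriving each row from the previous one.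
import Mathlib
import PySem

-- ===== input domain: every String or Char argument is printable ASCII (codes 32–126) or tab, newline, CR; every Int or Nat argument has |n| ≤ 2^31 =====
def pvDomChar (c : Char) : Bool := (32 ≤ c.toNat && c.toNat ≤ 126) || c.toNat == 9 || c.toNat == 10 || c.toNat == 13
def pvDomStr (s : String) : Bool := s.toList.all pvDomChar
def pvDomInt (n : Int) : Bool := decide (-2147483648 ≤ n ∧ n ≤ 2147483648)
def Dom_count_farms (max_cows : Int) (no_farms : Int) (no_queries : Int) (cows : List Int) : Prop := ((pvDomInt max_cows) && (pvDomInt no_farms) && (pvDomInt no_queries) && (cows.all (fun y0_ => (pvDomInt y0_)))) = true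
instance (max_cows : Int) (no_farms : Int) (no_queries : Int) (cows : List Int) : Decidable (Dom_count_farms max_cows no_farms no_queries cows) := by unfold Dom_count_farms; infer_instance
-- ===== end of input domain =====

-- B replaces A's day-by-day DP recurrence by closed-form farm trajectories:
-- every one of the 50 later rows is filled directly from the day-0 counts
-- (objective: alternative; return value only — neither program mutates its arguments).

-- ===== PORT A =====
def count_farms (max_cows : Int) (no_farms : Int) (no_queries : Int) (cows : List Int) : List (List Int) :=
  -- dp = [[0] * (max_cows+1) for _ in range(51)]
  let dp : List (List Int) := List.replicate 51 (List.replicate (max_cows + 1).toNat 0)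
  -- for cow in cows: dp[0][cow] += 1   (negative cow wraps; out of range raises, excluded by Pre_)
  let dp := cows.foldl (fun dp cow =>
      PySem.List.pySetD dp 0
        (PySem.List.pySetD (PySem.List.pyGetD dp 0 []) cow
          (PySem.List.pyGetD (PySem.List.pyGetD dp 0 []) cow 0 + 1))) dp
  -- for row in range(50): for col in range(1, max_cows+1): …
  (PySem.List.pyRange 0 50 1).foldl (fun dp row =>
    (PySem.List.pyRange 1 (max_cows + 1) 1).foldl (fun dp col =>
      if col * 2 ≤ max_cows then
        -- dp[row+1][col*2] = dp[row][col]
        PySem.List.pySetD dp (row + 1)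
          (PySem.List.pySetD (PySem.List.pyGetD dp (row + 1) []) (col * 2)
            (PySem.List.pyGetD (PySem.List.pyGetD dp row []) col 0))
      else
        -- dp[row+1][col] += 2 * dp[row][col]
        PySem.List.pySetD dp (row + 1)
          (PySem.List.pySetD (PySem.List.pyGetD dp (row + 1) []) col
            (PySem.List.pyGetD (PySem.List.pyGetD dp (row + 1) []) col 0
              + 2 * PySem.List.pyGetD (PySem.List.pyGetD dp row []) col 0))) dp) dp

-- ===== PORT B =====
-- _saturation(c, max_cows): while size*2 <= max_cows: size *= 2; k += 1
-- (the '1 ≤ size' conjunct only makes the recursion total; B calls it with size = c ≥ 1,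
-- where Python's loop terminates for the same reason)
def pvDblLoop (max_cows : Int) (k : Nat) (size : Int) : Nat × Int :=
  if size * 2 ≤ max_cows ∧ 1 ≤ size then pvDblLoop max_cows (k + 1) (size * 2) else (k, size)
termination_by (max_cows - size).toNat
decreasing_by omega

def count_farms_alt (max_cows : Int) (no_farms : Int) (no_queries : Int) (cows : List Int) : List (List Int) :=
  -- counts = [0] * (max_cows+1); for cow in cows: counts[cow] += 1
  let counts : List Int := cows.foldl (fun r cow =>
      PySem.List.pySetD r cow (PySem.List.pyGetD r cow 0 + 1))
      (List.replicate (max_cows + 1).toNat 0)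
  -- for d in range(1, 51): fill row directly from counts via the closed-form trajectory
  (PySem.List.pyRange 1 51 1).foldl (fun table d =>
    let row := (PySem.List.pyRange 1 (max_cows + 1) 1).foldl (fun row c =>
      let n := PySem.List.pyGetD counts c 0
      if n ≠ 0 then
        let ks := pvDblLoop max_cows 0 c
        if d ≤ (ks.1 : Int) then
          -- row[c << d] += n
          PySem.List.pySetD row (c * 2 ^ d.toNat)
            (PySem.List.pyGetD row (c * 2 ^ d.toNat) 0 + n)
        else
          -- row[size] += n << (d - k)
          PySem.List.pySetD row ks.2
            (PySem.List.pyGetD row ks.2 0 + n * 2 ^ (d - (ks.1 : Int)).toNat)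
      else row) (List.replicate (max_cows + 1).toNat 0)
    table ++ [row]) [counts]

-- ===== PRECONDITION & SPEC =====
-- Pre_ excludes exactly the inputs on which A raises IndexError: a cow index outside the
-- Python range of a list of length max_cows+1 (negative cows down to -(max_cows+1) wrap
-- in Python and are kept inside Pre_; both programs count them at the wrapped index).
def Pre_count_farms (max_cows : Int) (no_farms : Int) (no_queries : Int) (cows : List Int) : Prop :=
  ∀ c ∈ cows, -(max_cows + 1) ≤ c ∧ c < max_cows + 1
instance (max_cows : Int) (no_farms : Int) (no_queries : Int) (cows : List Int) : Decidable (Pre_count_farms max_cows no_farms no_queries cows) := by unfold Pre_count_farms; infer_instance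

def pvWitness_count_farms : Int × Int × Int × List Int := (6, 4, 1, [1, 2, 5, -1])

def Spec_count_farms (max_cows : Int) (no_farms : Int) (no_queries : Int) (cows : List Int) (out : List (List Int)) : Prop := out = count_farms_alt max_cows no_farms no_queries cows
instance (max_cows : Int) (no_farms : Int) (no_queries : Int) (cows : List Int) (out : List (List Int)) : Decidable (Spec_count_farms max_cows no_farms no_queries cows out) := by unfold Spec_count_farms; infer_instance

-- ===== CLAIM (what is proved, stated in full; the proofs are below) =====
def Claim_equal_count_farms : Prop := ∀ (max_cows : Int) (no_farms : Int) (no_queries : Int) (cows : List Int), Dom_count_farms max_cows no_farms no_queries cows → Pre_count_farms max_cows no_farms no_queries cows → Spec_count_farms max_cows no_farms no_queries cows (count_farms max_cows no_farms no_queries cows)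

-- ===== LEMMAS AND PROOFS =====

-- row length
def pvL (m : Int) : Nat := (m + 1).toNat
-- counts[cow] += 1
def pvInc (r : List Int) (c : Int) : List Int :=
  PySem.List.pySetD r c (PySem.List.pyGetD r c 0 + 1)
-- day-0 row (the seeding loop both programs share)
def pvCounts (m : Int) (cows : List Int) : List Int :=
  cows.foldl pvInc (List.replicate (pvL m) 0)
-- value of cell j of the next row as a function of the previous row
def pvNewCell (m : Int) (prev : List Int) (j : Nat) : Int :=
  (if j % 2 = 0 ∧ 2 ≤ j then prev.getD (j / 2) 0 else 0) +
  (if m < (j : Int) * 2 ∧ 1 ≤ j then 2 * prev.getD j 0 else 0)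
-- the reference table: row n of the result
def pvRow (m : Int) (cows : List Int) : Nat → List Int
  | 0 => pvCounts m cows
  | n + 1 => (List.range (pvL m)).map (pvNewCell m (pvRow m cows n))
-- partial cell value after A's inner loop has processed cols 1..c
def pvPartial (m : Int) (prev : List Int) (c j : Nat) : Int :=
  (if j % 2 = 0 ∧ 2 ≤ j ∧ j ≤ 2 * c then prev.getD (j / 2) 0 else 0) +
  (if m < (j : Int) * 2 ∧ 1 ≤ j ∧ j ≤ c then 2 * prev.getD j 0 else 0)
-- number of doublings before saturation, and unit trajectory value
def pvK (m c : Int) : Nat := (pvDblLoop m 0 c).1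
def pvU (m c : Int) (d : Nat) (j : Int) : Int :=
  if d ≤ pvK m c then (if j = c * 2 ^ d then 1 else 0)
  else (if j = c * 2 ^ pvK m c then 2 ^ (d - pvK m c) else 0)
-- total closed-form cell value on day d at column j
def pvS (m : Int) (r0 : List Int) (d : Nat) (j : Int) : Int :=
  ((PySem.List.pyRange 1 (m + 1) 1).map
    (fun c => PySem.List.pyGetD r0 c 0 * pvU m c d j)).sum

theorem pv_seedA' (cows : List Int) :
    ∀ (r : List Int) (t : List (List Int)),
    cows.foldl (fun dp cow =>
      PySem.List.pySetD dp 0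
        (PySem.List.pySetD (PySem.List.pyGetD dp 0 []) cow
          (PySem.List.pyGetD (PySem.List.pyGetD dp 0 []) cow 0 + 1))) (r :: t)
      = (cows.foldl pvInc r) :: t := by
  induction cows with
  | nil => intro r t; rfl
  | cons c cs ih =>
    intro r t
    have h0 : ∀ (x : List Int) (xs : List (List Int)) (v : List Int),
        PySem.List.pySetD (x :: xs) 0 v = v :: xs := by
      intro x xs v
      rw [PySem.List.pySetD_of_nonneg _ _ (by omega)]
      rfl
    simp only [List.foldl_cons, PySem.List.pyGetD_zero_cons, h0]
    rw [ih]
    rfl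

theorem pv_set_len {α : Type} (xs : List α) (v : α) : xs.set xs.length v = xs := by
  induction xs with
  | nil => rfl
  | cons x t ih => simpa using ih

theorem pv_set_append_left {α : Type} (xs ys : List α) (v : α) (i : Nat) (h : i = xs.length) :
    (xs ++ ys).set i v = xs ++ ys.set 0 v := by
  subst h
  cases ys with
  | nil => simp [pv_set_len]
  | cons y t => simp [List.set_append_right _ _ (le_refl _)]

theorem pv_getD_set_self {α : Type} (l : List α) (i : Nat) (v d : α) (h : i < l.length) :
    (l.set i v).getD i d = v := by
  simp [List.getD_eq_getElem?_getD, h]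

theorem pv_getD_set_ne {α : Type} (l : List α) (i j : Nat) (v d : α) (h : j ≠ i) :
    (l.set i v).getD j d = l.getD j d := by
  simp [List.getD_eq_getElem?_getD, List.getElem?_set_ne (by omega : i ≠ j)]

-- A's inner loop (table-level indices already in Nat form) only rewrites row k+1
theorem pv_innerA (m : Int) (k : Nat) (cols : List Int) :
    ∀ dp : List (List Int), k + 1 < dp.length →
    cols.foldl (fun dp col =>
      if col * 2 ≤ m then
        dp.set (k + 1)
          (PySem.List.pySetD (dp.getD (k + 1) []) (col * 2)
            (PySem.List.pyGetD (dp.getD k []) col 0))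
      else
        dp.set (k + 1)
          (PySem.List.pySetD (dp.getD (k + 1) []) col
            (PySem.List.pyGetD (dp.getD (k + 1) []) col 0
              + 2 * PySem.List.pyGetD (dp.getD k []) col 0))) dp
      = dp.set (k + 1)
          (cols.foldl (fun r col =>
            if col * 2 ≤ m then
              PySem.List.pySetD r (col * 2) (PySem.List.pyGetD (dp.getD k []) col 0)
            else
              PySem.List.pySetD r col
                (PySem.List.pyGetD r col 0 + 2 * PySem.List.pyGetD (dp.getD k []) col 0))
            (dp.getD (k + 1) [])) := by
  induction cols with
  | nil =>
    intro dp h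
    simp only [List.foldl_nil]
    rw [List.getD_eq_getElem dp [] (by omega), List.set_getElem_self]
  | cons col cs ih =>
    intro dp h
    simp only [List.foldl_cons]
    by_cases hc : col * 2 ≤ m
    · rw [if_pos hc, if_pos hc, ih _ (by simpa using h)]
      rw [pv_getD_set_ne _ _ _ _ _ (by omega), pv_getD_set_self _ _ _ _ (by omega),
        List.set_set]
    · rw [if_neg hc, if_neg hc, ih _ (by simpa using h)]
      rw [pv_getD_set_ne _ _ _ _ _ (by omega), pv_getD_set_self _ _ _ _ (by omega),
        List.set_set]

theorem pv_set_map_range {β : Type} (g : Nat → β) (n i : Nat) (v : β) :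
    ((List.range n).map g).set i v
      = (List.range n).map (fun j => if j = i then v else g j) := by
  apply List.ext_getElem
  · simp
  · intro k h1 h2
    simp only [List.length_set, List.length_map, List.length_range] at h1
    by_cases hk : k = i
    · subst hk; simp
    · simp [List.getElem_set_ne (by omega : i ≠ k), hk]

theorem pv_partial_succ_pos (m : Int) (prev : List Int) (c j : Nat)
    (hc : ((c + 1 : Nat) : Int) * 2 ≤ m) (hj : j < pvL m) :
    (if j = 2 * (c + 1) then prev.getD (c + 1) 0 else pvPartial m prev c j)
      = pvPartial m prev (c + 1) j := by
  by_cases hje : j = 2 * (c + 1)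
  · subst hje
    rw [if_pos rfl]
    unfold pvPartial
    rw [if_pos ⟨by omega, by omega, by omega⟩,
      if_neg (by push_cast; omega), show 2 * (c + 1) / 2 = c + 1 by omega]
    ring
  · rw [if_neg hje]
    unfold pvPartial
    have e1 : (j % 2 = 0 ∧ 2 ≤ j ∧ j ≤ 2 * c) ↔ (j % 2 = 0 ∧ 2 ≤ j ∧ j ≤ 2 * (c + 1)) := by
      omega
    have e2 : (m < (j : Int) * 2 ∧ 1 ≤ j ∧ j ≤ c) ↔ (m < (j : Int) * 2 ∧ 1 ≤ j ∧ j ≤ c + 1) := by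
      constructor
      · rintro ⟨a, b, d⟩; exact ⟨a, b, by omega⟩
      · rintro ⟨a, b, d⟩
        refine ⟨a, b, ?_⟩
        rcases Nat.lt_or_ge j (c + 1) with h | h
        · omega
        · exfalso; have : j = c + 1 := by omega
          subst this; push_cast at hc a; omega
    rw [if_congr e1 rfl rfl, if_congr e2 rfl rfl]

theorem pv_partial_succ_neg (m : Int) (prev : List Int) (c j : Nat)
    (hc : ¬ ((c + 1 : Nat) : Int) * 2 ≤ m) (hj : j < pvL m) :
    (if j = c + 1 then pvPartial m prev c (c + 1) + 2 * prev.getD (c + 1) 0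
      else pvPartial m prev c j)
      = pvPartial m prev (c + 1) j := by
  have hjm : (j : Int) ≤ m := by unfold pvL at hj; omega
  by_cases hje : j = c + 1
  · subst hje
    rw [if_pos rfl]
    unfold pvPartial
    have e1 : ((c+1) % 2 = 0 ∧ 2 ≤ c+1 ∧ c+1 ≤ 2 * c) ↔ ((c+1) % 2 = 0 ∧ 2 ≤ c+1 ∧ c+1 ≤ 2 * (c + 1)) := by
      omega
    rw [if_congr e1 rfl rfl, if_neg (show ¬(m < ((c+1:Nat) : Int)*2 ∧ 1 ≤ c+1 ∧ c+1 ≤ c) from fun h => by omega),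
      if_pos (show m < ((c+1:Nat):Int)*2 ∧ 1 ≤ c+1 ∧ c+1 ≤ c + 1 by refine ⟨by omega, by omega, by omega⟩)]
    ring
  · rw [if_neg hje]
    unfold pvPartial
    have e1 : (j % 2 = 0 ∧ 2 ≤ j ∧ j ≤ 2 * c) ↔ (j % 2 = 0 ∧ 2 ≤ j ∧ j ≤ 2 * (c + 1)) := by
      constructor
      · rintro ⟨a, b, d⟩; exact ⟨a, b, by omega⟩
      · rintro ⟨a, b, d⟩
        refine ⟨a, b, ?_⟩
        by_contra h
        have : j = 2 * (c + 1) := by omega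
        subst this; push_cast at hc hjm; omega
    have e2 : (m < (j : Int) * 2 ∧ 1 ≤ j ∧ j ≤ c) ↔ (m < (j : Int) * 2 ∧ 1 ≤ j ∧ j ≤ c + 1) := by
      omega
    rw [if_congr e1 rfl rfl, if_congr e2 rfl rfl]

theorem pv_stepCharAux (m : Int) (prev : List Int) :
    ∀ c : Nat, c ≤ m.toNat →
    (((List.range c).map (fun t => ((t + 1 : Nat) : Int))).foldl (fun r col =>
        if col * 2 ≤ m then
          PySem.List.pySetD r (col * 2) (PySem.List.pyGetD prev col 0)
        else
          PySem.List.pySetD r col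
            (PySem.List.pyGetD r col 0 + 2 * PySem.List.pyGetD prev col 0))
        (List.replicate (pvL m) 0))
      = (List.range (pvL m)).map (pvPartial m prev c) := by
  intro c
  induction c with
  | zero =>
    intro _
    simp only [List.range_zero, List.map_nil, List.foldl_nil]
    rw [show (List.range (pvL m)).map (pvPartial m prev 0)
        = (List.range (pvL m)).map (fun _ => (0 : Int)) from
      List.map_congr_left (by intro j hj; unfold pvPartial; rw [if_neg (by omega), if_neg (by omega)]; ring), List.map_const',
      List.length_range]
  | succ c ih =>
    intro hc
    rw [List.range_succ, List.map_append, List.foldl_append, ih (by omega)]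
    simp only [List.map_cons, List.map_nil, List.foldl_cons, List.foldl_nil]
    by_cases hb : ((c + 1 : Nat) : Int) * 2 ≤ m
    · rw [if_pos hb]
      have h2 : ((c + 1 : Nat) : Int) * 2 = ((2 * (c + 1) : Nat) : Int) := by push_cast; ring
      rw [h2, PySem.List.pySetD_natCast, PySem.List.pyGetD_natCast, pv_set_map_range]
      exact List.map_congr_left (fun j hj =>
        pv_partial_succ_pos m prev c j hb (by simpa using hj))
    · rw [if_neg hb]
      rw [PySem.List.pySetD_natCast, PySem.List.pyGetD_natCast, PySem.List.pyGetD_natCast,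
        pv_set_map_range]
      have hlt : c + 1 < pvL m := by unfold pvL; omega
      rw [List.getD_eq_getElem _ _ (by simpa using hlt), List.getElem_map, List.getElem_range]
      exact List.map_congr_left (fun j hj =>
        pv_partial_succ_neg m prev c j hb (by simpa using hj))

theorem pv_stepChar (m : Int) (prev : List Int) :
    ((PySem.List.pyRange 1 (m + 1) 1).foldl (fun r col =>
        if col * 2 ≤ m then
          PySem.List.pySetD r (col * 2) (PySem.List.pyGetD prev col 0)
        else
          PySem.List.pySetD r col
            (PySem.List.pyGetD r col 0 + 2 * PySem.List.pyGetD prev col 0))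
        (List.replicate (pvL m) 0))
      = (List.range (pvL m)).map (pvNewCell m prev) := by
  have hr : PySem.List.pyRange 1 (m + 1) 1
      = (List.range m.toNat).map (fun t => ((t + 1 : Nat) : Int)) := by
    rw [PySem.List.pyRange_one]
    have : (m + 1 - 1).toNat = m.toNat := by omega
    rw [this]
    exact List.map_congr_left (fun k hk => by push_cast; ring)
  rw [hr, pv_stepCharAux m prev m.toNat (le_refl _)]
  refine List.map_congr_left (fun j hj => ?_)
  have hj' : j < pvL m := by simpa using hj
  have hjm : (j : Int) ≤ m := by unfold pvL at hj'; omega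
  unfold pvPartial pvNewCell
  have e1 : (j % 2 = 0 ∧ 2 ≤ j ∧ j ≤ 2 * m.toNat) ↔ (j % 2 = 0 ∧ 2 ≤ j) := by omega
  have e2 : (m < (j : Int) * 2 ∧ 1 ≤ j ∧ j ≤ m.toNat) ↔ (m < (j : Int) * 2 ∧ 1 ≤ j) := by omega
  rw [if_congr e1 rfl rfl, if_congr e2 rfl rfl]

theorem pv_A_eq (m nf nq : Int) (cows : List Int) :
    count_farms m nf nq cows = (List.range 51).map (pvRow m cows) := by
  have hz : List.replicate 51 (List.replicate (pvL m) (0:Int))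
      = (List.replicate (pvL m) (0:Int)) :: List.replicate 50 (List.replicate (pvL m) 0) := rfl
  simp only [count_farms]
  rw [show (m + 1).toNat = pvL m from rfl, hz, pv_seedA' cows]
  have h50 : PySem.List.pyRange 0 50 1 = (List.range 50).map (fun k => (k : Int)) := by
    have := PySem.List.pyRange_zero_nat 50
    norm_num at this ⊢
    exact this
  rw [h50, List.foldl_map]
  have main : ∀ n, n ≤ 50 →
      (List.range n).foldl (fun (dp : List (List Int)) (k : Nat) =>
        (PySem.List.pyRange 1 (m + 1) 1).foldl (fun dp col =>
          if col * 2 ≤ m then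
            PySem.List.pySetD dp ((k : Int) + 1)
              (PySem.List.pySetD (PySem.List.pyGetD dp ((k : Int) + 1) []) (col * 2)
                (PySem.List.pyGetD (PySem.List.pyGetD dp (k : Int) []) col 0))
          else
            PySem.List.pySetD dp ((k : Int) + 1)
              (PySem.List.pySetD (PySem.List.pyGetD dp ((k : Int) + 1) []) col
                (PySem.List.pyGetD (PySem.List.pyGetD dp ((k : Int) + 1) []) col 0
                  + 2 * PySem.List.pyGetD (PySem.List.pyGetD dp (k : Int) []) col 0))) dp)
        ((pvCounts m cows) :: List.replicate 50 (List.replicate (pvL m) 0))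
      = (List.range (n + 1)).map (pvRow m cows)
          ++ List.replicate (50 - n) (List.replicate (pvL m) 0) := by
    intro n
    induction n with
    | zero => intro _; simp [pvRow]
    | succ n ih =>
      intro hn
      rw [List.range_succ, List.foldl_append, ih (by omega), List.foldl_cons, List.foldl_nil]
      have hcast : ∀ dp : List (List Int), ((n : Int) + 1) = ((n + 1 : Nat) : Int) := by
        intro _; push_cast; ring
      simp only [hcast (([]) : List (List Int)), PySem.List.pySetD_natCast,
        PySem.List.pyGetD_natCast]
      set T := (List.range (n + 1)).map (pvRow m cows)
        ++ List.replicate (50 - n) (List.replicate (pvL m) (0:Int)) with hT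
      have hTlen : T.length = 51 := by simp [hT]; omega
      rw [pv_innerA m n _ T (by omega)]
      have hLlen : ((List.range (n + 1)).map (pvRow m cows)).length = n + 1 := by simp
      have hgk : T.getD n [] = pvRow m cows n := by
        rw [hT, List.getD_append _ _ _ _ (by omega)]
        rw [List.getD_eq_getElem _ _ (by omega), List.getElem_map, List.getElem_range]
      have hgk1 : T.getD (n + 1) [] = List.replicate (pvL m) 0 := by
        rw [hT, List.getD_append_right _ _ _ _ (by omega), hLlen, Nat.sub_self]
        rw [show 50 - n = (50 - (n+1)) + 1 by omega, List.replicate_succ]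
        rfl
      rw [hgk, hgk1, pv_stepChar]
      have hset : T.set (n + 1) ((List.range (pvL m)).map (pvNewCell m (pvRow m cows n)))
          = (List.range (n + 1 + 1)).map (pvRow m cows)
            ++ List.replicate (50 - (n + 1)) (List.replicate (pvL m) 0) := by
        rw [hT, pv_set_append_left _ _ _ _ hLlen.symm]
        have hrep : List.replicate (50 - n) (List.replicate (pvL m) (0:Int))
            = (List.replicate (pvL m) (0:Int)) :: List.replicate (50 - (n+1)) (List.replicate (pvL m) 0) := by
          rw [show 50 - n = (50 - (n+1)) + 1 by omega, List.replicate_succ]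
        rw [hrep, List.set_cons_zero, List.range_succ (n := n+1), List.map_append]
        simp [pvRow]
      rw [hset]
  exact (main 50 (le_refl _)).trans (by norm_num)

-- ----- B-side lemmas -----

-- while-loop characterisation: result size, exponent, stop condition, bound
theorem pv_dbl_spec (m : Int) : ∀ (n : Nat) (k : Nat) (s : Int), (m - s).toNat = n → 1 ≤ s →
    (pvDblLoop m k s).2 = s * 2 ^ ((pvDblLoop m k s).1 - k)
    ∧ k ≤ (pvDblLoop m k s).1
    ∧ m < (pvDblLoop m k s).2 * 2
    ∧ (s ≤ m → (pvDblLoop m k s).2 ≤ m) := by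
  intro n
  induction n using Nat.strong_induction_on with
  | _ n ih =>
    intro k s hn hs
    rw [pvDblLoop]
    by_cases h : s * 2 ≤ m ∧ 1 ≤ s
    · rw [if_pos h]
      obtain ⟨e1, e2, e3, e4⟩ := ih (m - s * 2).toNat (by omega) (k + 1) (s * 2) rfl (by omega)
      refine ⟨?_, by omega, e3, fun _ => e4 (by omega)⟩
      rw [e1, show (pvDblLoop m (k + 1) (s * 2)).1 - k = ((pvDblLoop m (k + 1) (s * 2)).1 - (k + 1)) + 1 by omega,
        pow_succ]
      ring
    · rw [if_neg h]
      exact ⟨by simp, le_refl _, by omega, fun hsm => by simp; omega⟩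

theorem pv_dbl_size (m c : Int) (hc : 1 ≤ c) : (pvDblLoop m 0 c).2 = c * 2 ^ pvK m c := by
  have := (pv_dbl_spec m (m - c).toNat 0 c rfl hc).1
  simpa [pvK] using this

theorem pv_dbl_stop (m c : Int) (hc : 1 ≤ c) : m < c * 2 ^ (pvK m c + 1) := by
  have h := (pv_dbl_spec m (m - c).toNat 0 c rfl hc).2.2.1
  rw [pv_dbl_size m c hc] at h
  calc m < c * 2 ^ pvK m c * 2 := h
    _ = c * 2 ^ (pvK m c + 1) := by rw [pow_succ]; ring

theorem pv_dbl_le (m c : Int) (hc : 1 ≤ c) (hcm : c ≤ m) : c * 2 ^ pvK m c ≤ m := by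
  have := (pv_dbl_spec m (m - c).toNat 0 c rfl hc).2.2.2 hcm
  rwa [pv_dbl_size m c hc] at this

theorem pv_pow_pos (t : Nat) : (0 : Int) < 2 ^ t := by positivity

theorem pv_pow_mono (a b : Nat) (h : a ≤ b) : (2 : Int) ^ a ≤ 2 ^ b :=
  pow_le_pow_right₀ (by norm_num) h

-- the unit trajectory satisfies exactly A's cell recurrence
theorem pvU_step (m c : Int) (d : Nat) (j : Int)
    (hc1 : 1 ≤ c) (hcm : c ≤ m) (hj1 : 1 ≤ j) (hjm : j ≤ m) :
    pvU m c (d + 1) j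
      = (if j % 2 = 0 ∧ 2 ≤ j then pvU m c d (j / 2) else 0)
        + (if m < j * 2 then 2 * pvU m c d j else 0) := by
  obtain ⟨K, hK⟩ : ∃ K, pvK m c = K := ⟨_, rfl⟩
  have hKle : c * 2 ^ K ≤ m := by rw [← hK]; exact pv_dbl_le m c hc1 hcm
  have hKstop : m < c * 2 ^ (K + 1) := by rw [← hK]; exact pv_dbl_stop m c hc1
  have hW : c * 2 ^ (K + 1) = c * 2 ^ K * 2 := by rw [pow_succ]; ring
  have hZ : (0:Int) < c * 2 ^ K := mul_pos (by omega) (pv_pow_pos K)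
  unfold pvU
  rw [hK]
  rcases Nat.lt_trichotomy d K with hd | hd | hd
  · -- d + 1 ≤ K : still doubling on both days
    have hB : c * 2 ^ (d + 1) = c * 2 ^ d * 2 := by rw [pow_succ]; ring
    have hA : (0:Int) < c * 2 ^ d := mul_pos (by omega) (pv_pow_pos d)
    have hBm : c * 2 ^ (d + 1) ≤ m :=
      le_trans (mul_le_mul_of_nonneg_left (pv_pow_mono _ _ (by omega)) (by omega)) hKle
    split_ifs <;> omega
  · -- d = K : saturation day
    subst hd
    rw [show d + 1 - d = 1 by omega, show d - d = 0 by omega, pow_one, pow_zero]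
    split_ifs <;> omega
  · -- K < d : saturated on both days
    have hP : (0:Int) < 2 ^ (d - K) := pv_pow_pos _
    rw [show d + 1 - K = (d - K) + 1 by omega, pow_succ]
    split_ifs <;> omega

-- generic guarded scatter-add loop: length and cells
theorem pv_scatter (t a : Int → Int) (q : Int → Bool) (cs : List Int) :
    ∀ (r : List Int),
    (∀ c ∈ cs, q c = true → 0 ≤ t c ∧ t c < (r.length : Int)) →
    ((cs.foldl (fun row c => if q c = true then
        PySem.List.pySetD row (t c) (PySem.List.pyGetD row (t c) 0 + a c) else row) r).length
        = r.length
    ∧ ∀ j : Nat, j < r.length →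
      (cs.foldl (fun row c => if q c = true then
        PySem.List.pySetD row (t c) (PySem.List.pyGetD row (t c) 0 + a c) else row) r).getD j 0
      = r.getD j 0 + (cs.map (fun c => if q c = true ∧ t c = (j : Int) then a c else 0)).sum) := by
  induction cs with
  | nil => intro r _; exact ⟨rfl, fun j _ => by simp⟩
  | cons c cs ih =>
    intro r hb
    simp only [List.foldl_cons]
    by_cases hq : q c = true
    · rw [if_pos hq]
      obtain ⟨hb1, hb2⟩ := hb c List.mem_cons_self hq
      set r' := PySem.List.pySetD r (t c) (PySem.List.pyGetD r (t c) 0 + a c) with hr'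
      have hlen' : r'.length = r.length := by
        rw [hr', PySem.List.length_pySetD]
      obtain ⟨ihl, ihg⟩ := ih r' (by rw [hlen']; exact fun c' hc' => hb c' (List.mem_cons_of_mem _ hc'))
      refine ⟨by rw [ihl, hlen'], fun j hj => ?_⟩
      rw [ihg j (by omega)]
      have htn : t c = ((t c).toNat : Int) := by omega
      have hset : r' = r.set (t c).toNat (r.getD (t c).toNat 0 + a c) := by
        have hget : PySem.List.pyGetD r (t c) 0 = r.getD (t c).toNat 0 := by
          conv_lhs => rw [htn]
          rw [PySem.List.pyGetD_natCast]
        rw [hr', PySem.List.pySetD_of_nonneg _ _ hb1, hget]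
      simp only [List.map_cons, List.sum_cons]
      by_cases hj' : (t c).toNat = j
      · rw [if_pos ⟨hq, by omega⟩, hset, hj', pv_getD_set_self _ _ _ _ (by omega)]
        ring
      · rw [if_neg (by rintro ⟨-, he⟩; omega), hset, pv_getD_set_ne _ _ _ _ _ (by omega)]
        ring
    · rw [if_neg hq]
      obtain ⟨ihl, ihg⟩ := ih r (fun c' hc' => hb c' (List.mem_cons_of_mem _ hc'))
      refine ⟨ihl, fun j hj => ?_⟩
      rw [ihg j hj]
      simp only [List.map_cons, List.sum_cons]
      rw [if_neg (by rintro ⟨hqc, -⟩; exact hq hqc)]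
      ring

theorem pv_sum_map_add (l : List Int) (f g : Int → Int) :
    (l.map (fun x => f x + g x)).sum = (l.map f).sum + (l.map g).sum := by
  induction l with
  | nil => simp
  | cons x xs ih => simp only [List.map_cons, List.sum_cons, ih]; ring

theorem pv_sum_if (P : Prop) [Decidable P] (l : List Int) (f : Int → Int) :
    (l.map (fun c => if P then f c else 0)).sum = if P then (l.map f).sum else 0 := by
  split_ifs <;> simp

theorem pv_sum_mul_left (l : List Int) (f : Int → Int) (a : Int) :
    (l.map (fun c => a * f c)).sum = a * (l.map f).sum := by
  induction l with
  | nil => simp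
  | cons x xs ih => simp only [List.map_cons, List.sum_cons, ih]; ring

theorem pv_sum_ind (n : Nat) (f : Nat → Int) (i : Nat) (h : i < n) :
    ((List.range n).map (fun t => if t = i then f t else 0)).sum = f i := by
  induction n with
  | zero => omega
  | succ n ih =>
    rw [List.range_succ, List.map_append, List.sum_append]
    by_cases hn : i = n
    · subst hn
      have hz : ((List.range i).map (fun t => if t = i then f t else 0)).sum = 0 := by
        rw [show (List.range i).map (fun t => if t = i then f t else 0)
            = (List.range i).map (fun _ => (0:Int)) from
          List.map_congr_left (fun t ht => by
            rw [if_neg (by simp at ht; omega)])]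
        simp
      rw [hz]
      simp
    · rw [ih (by omega)]
      simp only [List.map_cons, List.map_nil, List.sum_cons, List.sum_nil]
      rw [if_neg (by omega)]
      ring

theorem pv_hr1 (m : Int) : PySem.List.pyRange 1 (m + 1) 1
    = (List.range m.toNat).map (fun t => ((t + 1 : Nat) : Int)) := by
  rw [PySem.List.pyRange_one]
  have : (m + 1 - 1).toNat = m.toNat := by omega
  rw [this]
  exact List.map_congr_left (fun k hk => by push_cast; ring)

-- the closed-form cell sum satisfies A's recurrence
theorem pvS_step (m : Int) (r0 : List Int) (d : Nat) (j : Int) (hj1 : 1 ≤ j) (hjm : j ≤ m) :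
    pvS m r0 (d + 1) j
      = (if j % 2 = 0 ∧ 2 ≤ j then pvS m r0 d (j / 2) else 0)
        + (if m < j * 2 then 2 * pvS m r0 d j else 0) := by
  unfold pvS
  have key : ((PySem.List.pyRange 1 (m + 1) 1).map
        (fun c => PySem.List.pyGetD r0 c 0 * pvU m c (d + 1) j)).sum
      = ((PySem.List.pyRange 1 (m + 1) 1).map
        (fun c => (if j % 2 = 0 ∧ 2 ≤ j then PySem.List.pyGetD r0 c 0 * pvU m c d (j / 2) else 0)
          + (if m < j * 2 then 2 * (PySem.List.pyGetD r0 c 0 * pvU m c d j) else 0))).sum := by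
    refine congrArg List.sum (List.map_congr_left (fun c hc => ?_))
    have hcb : 1 ≤ c ∧ c < m + 1 := (PySem.List.mem_pyRange_one).mp hc
    rw [pvU_step m c d j hcb.1 (by omega) hj1 hjm]
    split_ifs <;> ring
  rw [key, pv_sum_map_add]
  congr 1
  · rw [pv_sum_if]
  · rw [pv_sum_if]
    split_ifs with h
    · rw [pv_sum_mul_left]
    · rfl

-- pvRow = pvS on columns 1..m
theorem pv_row_eq_S (m : Int) (cows : List Int) :
    ∀ (d : Nat) (j : Nat), 1 ≤ j → j < pvL m →
    (pvRow m cows d).getD j 0 = pvS m (pvCounts m cows) d (j : Int) := by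
  intro d
  induction d with
  | zero =>
    intro j hj1 hj
    have hjm : (j : Int) ≤ m := by unfold pvL at hj; omega
    show (pvCounts m cows).getD j 0 = _
    unfold pvS
    rw [pv_hr1]
    rw [List.map_map]
    have hcong : ((List.range m.toNat).map
          ((fun c => PySem.List.pyGetD (pvCounts m cows) c 0 * pvU m c 0 (j:Int)) ∘ (fun t => ((t + 1 : Nat) : Int))))
        = (List.range m.toNat).map (fun t => if t = j - 1
            then PySem.List.pyGetD (pvCounts m cows) ((t + 1 : Nat) : Int) 0 else 0) := by
      refine List.map_congr_left (fun t ht => ?_)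
      simp only [Function.comp]
      unfold pvU
      rw [if_pos (Nat.zero_le _), pow_zero, mul_one]
      by_cases he : ((j:Int)) = ((t + 1 : Nat) : Int)
      · rw [if_pos he, if_pos (by omega), mul_one]
      · rw [if_neg he, if_neg (by omega), mul_zero]
    rw [hcong, pv_sum_ind _ _ (j - 1) (by omega)]
    rw [show ((j - 1 + 1 : Nat) : Int) = ((j : Nat) : Int) by omega, PySem.List.pyGetD_natCast]
  | succ d ih =>
    intro j hj1 hj
    have hjm : (j : Int) ≤ m := by unfold pvL at hj; omega
    show ((List.range (pvL m)).map (pvNewCell m (pvRow m cows d))).getD j 0 = _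
    rw [PySem.List.getD_map_range _ _ _ _ hj]
    unfold pvNewCell
    rw [pvS_step m _ d (j : Int) (by omega) hjm]
    congr 1
    · by_cases h1 : j % 2 = 0 ∧ 2 ≤ j
      · rw [if_pos h1, if_pos (by omega : (j:Int) % 2 = 0 ∧ 2 ≤ (j:Int)),
          ih (j / 2) (by omega) (by omega),
          show (((j / 2 : Nat)) : Int) = (j : Int) / 2 by omega]
      · rw [if_neg h1, if_neg (by omega : ¬((j:Int) % 2 = 0 ∧ 2 ≤ (j:Int)))]
    · by_cases h2 : m < (j : Int) * 2
      · rw [if_pos (⟨h2, hj1⟩ : m < (j:Int) * 2 ∧ 1 ≤ j), if_pos h2, ih j hj1 hj]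
      · rw [if_neg (by rintro ⟨h, -⟩; exact h2 h), if_neg h2]

theorem pv_row_zero_cell (m : Int) (cows : List Int) (d : Nat) (hd : 1 ≤ d) (h0 : 0 < pvL m) :
    (pvRow m cows d).getD 0 0 = 0 := by
  obtain ⟨d', rfl⟩ : ∃ d', d = d' + 1 := ⟨d - 1, by omega⟩
  show ((List.range (pvL m)).map (pvNewCell m (pvRow m cows d'))).getD 0 0 = 0
  rw [PySem.List.getD_map_range _ _ _ _ h0]
  unfold pvNewCell
  rw [if_neg (by omega), if_neg (by omega)]
  ring

theorem pv_row_len (m : Int) (cows : List Int) : ∀ d, (pvRow m cows d).length = pvL m := by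
  intro d
  cases d with
  | zero =>
    show (pvCounts m cows).length = pvL m
    unfold pvCounts
    suffices h : ∀ (l : List Int) (r : List Int), (l.foldl pvInc r).length = r.length by
      rw [h]; simp
    intro l
    induction l with
    | nil => intro r; rfl
    | cons c cs ih => intro r; rw [List.foldl_cons, ih]; unfold pvInc; rw [PySem.List.length_pySetD]
  | succ n => show ((List.range (pvL m)).map _).length = pvL m; simp

-- scatter target, amount and occupancy guard of B's inner loop (proof-side names)
def pvTf (m : Int) (t : Nat) (c : Int) : Int :=
  if ((t + 1 : Nat) : Int) ≤ (pvK m c : Int) then c * 2 ^ (t + 1) else c * 2 ^ pvK m c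
def pvAf (m : Int) (cows : List Int) (t : Nat) (c : Int) : Int :=
  if ((t + 1 : Nat) : Int) ≤ (pvK m c : Int) then PySem.List.pyGetD (pvCounts m cows) c 0
  else PySem.List.pyGetD (pvCounts m cows) c 0 * 2 ^ (t + 1 - pvK m c)
def pvQb (m : Int) (cows : List Int) (c : Int) : Bool :=
  decide (PySem.List.pyGetD (pvCounts m cows) c 0 ≠ 0)

-- B's day-d row equals the reference row d  (d = t+1, t < 50)
theorem pv_B_row (m : Int) (cows : List Int) (t : Nat) :
    ((PySem.List.pyRange 1 (m + 1) 1).foldl (fun row c =>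
      let n := PySem.List.pyGetD (pvCounts m cows) c 0
      if n ≠ 0 then
        let ks := pvDblLoop m 0 c
        if ((t + 1 : Nat) : Int) ≤ (ks.1 : Int) then
          PySem.List.pySetD row (c * 2 ^ ((t + 1 : Nat) : Int).toNat)
            (PySem.List.pyGetD row (c * 2 ^ ((t + 1 : Nat) : Int).toNat) 0 + n)
        else
          PySem.List.pySetD row ks.2
            (PySem.List.pyGetD row ks.2 0 + n * 2 ^ (((t + 1 : Nat) : Int) - (ks.1 : Int)).toNat)
      else row) (List.replicate (pvL m) 0))
      = pvRow m cows (t + 1) := by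
  -- massage B's loop body into the generic scatter shape
  have htn : (((t + 1 : Nat) : Int)).toNat = t + 1 := by omega
  have hbody : ∀ (row : List Int) (c : Int), c ∈ PySem.List.pyRange 1 (m + 1) 1 →
      (let n := PySem.List.pyGetD (pvCounts m cows) c 0
       if n ≠ 0 then
         let ks := pvDblLoop m 0 c
         if ((t + 1 : Nat) : Int) ≤ (ks.1 : Int) then
           PySem.List.pySetD row (c * 2 ^ ((t + 1 : Nat) : Int).toNat)
             (PySem.List.pyGetD row (c * 2 ^ ((t + 1 : Nat) : Int).toNat) 0 + n)
         else
           PySem.List.pySetD row ks.2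
             (PySem.List.pyGetD row ks.2 0 + n * 2 ^ (((t + 1 : Nat) : Int) - (ks.1 : Int)).toNat)
       else row)
      = (if pvQb m cows c = true then
          PySem.List.pySetD row (pvTf m t c) (PySem.List.pyGetD row (pvTf m t c) 0 + pvAf m cows t c)
        else row) := by
    intro row c hc
    have hcb : 1 ≤ c ∧ c < m + 1 := (PySem.List.mem_pyRange_one).mp hc
    simp only [htn, pvQb, pvTf, pvAf, decide_eq_true_eq]
    by_cases hn : PySem.List.pyGetD (pvCounts m cows) c 0 ≠ 0
    · rw [if_pos hn, if_pos hn]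
      by_cases hd : ((t + 1 : Nat) : Int) ≤ ((pvDblLoop m 0 c).1 : Int)
      · rw [if_pos hd]
        rw [if_pos (show ((t + 1 : Nat) : Int) ≤ ((pvK m c : Nat) : Int) from hd),
          if_pos (show ((t + 1 : Nat) : Int) ≤ ((pvK m c : Nat) : Int) from hd)]
      · rw [if_neg hd]
        rw [if_neg (show ¬ ((t + 1 : Nat) : Int) ≤ ((pvK m c : Nat) : Int) from hd),
          if_neg (show ¬ ((t + 1 : Nat) : Int) ≤ ((pvK m c : Nat) : Int) from hd),
          pv_dbl_size m c hcb.1, pvK,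
          show (((t + 1 : Nat) : Int) - ((pvDblLoop m 0 c).1 : Int)).toNat
            = t + 1 - (pvDblLoop m 0 c).1 by omega]
    · rw [if_neg hn, if_neg hn]
  have hfold := PySem.List.foldl_congr_mem (PySem.List.pyRange 1 (m + 1) 1)
      (fun row c =>
        let n := PySem.List.pyGetD (pvCounts m cows) c 0
        if n ≠ 0 then
          let ks := pvDblLoop m 0 c
          if ((t + 1 : Nat) : Int) ≤ (ks.1 : Int) then
            PySem.List.pySetD row (c * 2 ^ ((t + 1 : Nat) : Int).toNat)
              (PySem.List.pyGetD row (c * 2 ^ ((t + 1 : Nat) : Int).toNat) 0 + n)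
          else
            PySem.List.pySetD row ks.2
              (PySem.List.pyGetD row ks.2 0 + n * 2 ^ (((t + 1 : Nat) : Int) - (ks.1 : Int)).toNat)
        else row)
      (fun row c => if pvQb m cows c = true then
          PySem.List.pySetD row (pvTf m t c) (PySem.List.pyGetD row (pvTf m t c) 0 + pvAf m cows t c)
        else row)
      (List.replicate (pvL m) 0)
      (fun row c hc => hbody row c hc)
  rw [hfold]
  -- bounds for the scatter targets
  have hbound : ∀ c ∈ PySem.List.pyRange 1 (m + 1) 1, pvQb m cows c = true →
      0 ≤ pvTf m t c ∧ pvTf m t c < ((List.replicate (pvL m) (0:Int)).length : Int) := by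
    intro c hc _
    have hcb : 1 ≤ c ∧ c < m + 1 := (PySem.List.mem_pyRange_one).mp hc
    have hKle : c * 2 ^ pvK m c ≤ m := pv_dbl_le m c hcb.1 (by omega)
    rw [List.length_replicate]
    have hLm : ((pvL m : Nat) : Int) = m + 1 := by unfold pvL; omega
    rw [hLm]
    unfold pvTf
    split_ifs with h
    · have hle : (t + 1 : Nat) ≤ pvK m c := by omega
      have : c * 2 ^ (t + 1) ≤ c * 2 ^ pvK m c :=
        mul_le_mul_of_nonneg_left (pv_pow_mono _ _ hle) (by omega)
      have hpos := pv_pow_pos (t + 1)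
      constructor
      · nlinarith
      · omega
    · have hpos := pv_pow_pos (pvK m c)
      constructor
      · nlinarith
      · omega
  obtain ⟨hlen, hget⟩ := pv_scatter (pvTf m t) (pvAf m cows t) (pvQb m cows)
      (PySem.List.pyRange 1 (m + 1) 1) (List.replicate (pvL m) 0) hbound
  apply List.ext_getElem
  · rw [hlen, List.length_replicate, pv_row_len]
  · intro j h1 h2
    rw [hlen, List.length_replicate] at h1
    rw [← List.getD_eq_getElem _ 0 h2, ← List.getD_eq_getElem _ 0 (by rwa [hlen, List.length_replicate])]
    rw [hget j (by rwa [List.length_replicate])]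
    rw [List.getD_eq_getElem _ 0 (by rwa [List.length_replicate]), List.getElem_replicate]
    -- per-column equality with n_c * pvU
    have hsum : ((PySem.List.pyRange 1 (m + 1) 1).map
          (fun c => if pvQb m cows c = true ∧ pvTf m t c = (j : Int) then pvAf m cows t c else 0))
        = (PySem.List.pyRange 1 (m + 1) 1).map
          (fun c => PySem.List.pyGetD (pvCounts m cows) c 0 * pvU m c (t + 1) (j : Int)) := by
      refine List.map_congr_left (fun c hc => ?_)
      have hcb : 1 ≤ c ∧ c < m + 1 := (PySem.List.mem_pyRange_one).mp hc
      simp only [pvQb, pvTf, pvAf, decide_eq_true_eq]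
      unfold pvU
      by_cases hd : ((t + 1 : Nat) : Int) ≤ ((pvK m c : Nat) : Int)
      · rw [if_pos (by omega : t + 1 ≤ pvK m c)]
        by_cases hn : PySem.List.pyGetD (pvCounts m cows) c 0 ≠ 0
        · by_cases hj : (j : Int) = c * 2 ^ (t + 1)
          · rw [if_pos ⟨hn, by rw [if_pos hd]; omega⟩, if_pos hd, if_pos hj, mul_one]
          · rw [if_neg (by rintro ⟨-, he⟩; rw [if_pos hd] at he; omega), if_neg hj, mul_zero]
        · push_neg at hn
          rw [if_neg (by rintro ⟨h, -⟩; exact h hn), hn]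
          split_ifs <;> ring
      · rw [if_neg (by omega : ¬ t + 1 ≤ pvK m c)]
        by_cases hn : PySem.List.pyGetD (pvCounts m cows) c 0 ≠ 0
        · by_cases hj : (j : Int) = c * 2 ^ pvK m c
          · rw [if_pos ⟨hn, by rw [if_neg hd]; omega⟩, if_neg hd, if_pos hj]
          · rw [if_neg (by rintro ⟨-, he⟩; rw [if_neg hd] at he; omega), if_neg hj, mul_zero]
        · push_neg at hn
          rw [if_neg (by rintro ⟨h, -⟩; exact h hn), hn]
          split_ifs <;> ring
    rw [hsum]
    by_cases hj1 : 1 ≤ j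
    · rw [← pvS, ← pv_row_eq_S m cows (t + 1) j hj1 h1,
        List.getD_eq_getElem _ 0 (by rw [pv_row_len]; exact h1)]
      ring_nf
    · have hj0 : j = 0 := by omega
      subst hj0
      have hz : ((PySem.List.pyRange 1 (m + 1) 1).map
            (fun c => PySem.List.pyGetD (pvCounts m cows) c 0 * pvU m c (t + 1) ((0:Nat) : Int)))
          = (PySem.List.pyRange 1 (m + 1) 1).map (fun _ => (0:Int)) := by
        refine List.map_congr_left (fun c hc => ?_)
        have hcb : 1 ≤ c ∧ c < m + 1 := (PySem.List.mem_pyRange_one).mp hc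
        unfold pvU
        have hp1 := pv_pow_pos (t + 1)
        have hp2 := pv_pow_pos (pvK m c)
        split_ifs with h1 h2 h3
        · exfalso; have hpc := mul_pos (show (0:Int) < c by omega) hp1; omega
        · ring
        · exfalso; have hpc := mul_pos (show (0:Int) < c by omega) hp2; omega
        · ring
      rw [hz, pv_row_zero_cell m cows (t + 1) (by omega) h1]
      simp

theorem pv_B_eq (m nf nq : Int) (cows : List Int) :
    count_farms_alt m nf nq cows = (List.range 51).map (pvRow m cows) := by
  simp only [count_farms_alt]
  rw [show (m + 1).toNat = pvL m from rfl]
  have hc0 : cows.foldl (fun r cow =>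
      PySem.List.pySetD r cow (PySem.List.pyGetD r cow 0 + 1)) (List.replicate (pvL m) 0)
      = pvCounts m cows := rfl
  rw [hc0]
  rw [PySem.List.foldl_append_singleton_eq_map]
  have h51 : PySem.List.pyRange 1 51 1 = (List.range 50).map (fun t => ((t + 1 : Nat) : Int)) := by
    rw [PySem.List.pyRange_one]
    norm_num
    exact List.map_congr_left (fun k hk => by push_cast; ring)
  rw [h51, List.map_map, List.singleton_append]
  conv_rhs => rw [show List.range 51 = List.range (50 + 1) from rfl, List.range_succ_eq_map,
    List.map_cons, List.map_map]
  congr 1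
  refine List.map_congr_left (fun t ht => ?_)
  simp only [Function.comp]
  exact pv_B_row m cows t

-- ===== VERDICT (by name: the statement is the Claim_ definition above) =====
theorem count_farms_spec : Claim_equal_count_farms := by
  intro m nf nq cows _ _
  unfold Spec_count_farms
  rw [pv_A_eq, pv_B_eq]
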